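-- pv_equiv track=rewrite | github.com/masmi9/BluJay | scanners/aods/core/ai_ml/adaptive_scanning_intelligence.py | _detect_framework_type
-- ===== SOURCE A (Python) =====
-- from typing import Dict, List, Any, Tuple
--
-- def _detect_framework_type(file_list: List[str]) -> str:
--     """Detect application framework type."""
--     # Check for common framework indicators
--     if any("flutter" in f.lower() for f in file_list):
--         return "flutter"
--     elif any("react" in f.lower() or "ionic" in f.lower() for f in file_list):
--         return "hybrid"
--     elif any("cordova" in f.lower() or "phonegap" in f.lower() for f in file_list):
--         return "web"
--     elif any("unity" in f.lower() or "unreal" in f.lower() for f in file_list):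
--         return "game"
--     elif any("enterprise" in f.lower() or "corp" in f.lower() for f in file_list):
--         return "enterprise"
--     else:
--         return "native"
-- ===== SOURCE B (Python) =====
-- _FRAMEWORKS = ["flutter", "hybrid", "web", "game", "enterprise", "native"]
-- _KEYWORDS = [
--     ["flutter"],
--     ["react", "ionic"],
--     ["cordova", "phonegap"],
--     ["unity", "unreal"],
--     ["enterprise", "corp"],
-- ]
--
--
-- def _rank(filename):
--     """Priority rank of one filename: index of the first keyword group it matches."""
--     g = filename.lower()
--     i = 0
--     for kws in _KEYWORDS:
--         if any(k in g for k in kws):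
--             return i
--         i += 1
--     return i
--
--
-- def _detect_framework_type(file_list):
--     """Detect application framework type: classify each file to a priority rank
--     via the keyword table and name the framework of the best (minimum) rank."""
--     return _FRAMEWORKS[min(map(_rank, file_list), default=len(_KEYWORDS))]
-- ===== Notes on version B (the rewrite author's own statement) =====
-- stated objective: alternative
-- what changed: Replaces A's five prioritized any(...) existence scans by a data-driven classification: a keyword table maps each filename to a priority rank in one pass, and the result is the framework name at the minimum rank.
import Mathlib
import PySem

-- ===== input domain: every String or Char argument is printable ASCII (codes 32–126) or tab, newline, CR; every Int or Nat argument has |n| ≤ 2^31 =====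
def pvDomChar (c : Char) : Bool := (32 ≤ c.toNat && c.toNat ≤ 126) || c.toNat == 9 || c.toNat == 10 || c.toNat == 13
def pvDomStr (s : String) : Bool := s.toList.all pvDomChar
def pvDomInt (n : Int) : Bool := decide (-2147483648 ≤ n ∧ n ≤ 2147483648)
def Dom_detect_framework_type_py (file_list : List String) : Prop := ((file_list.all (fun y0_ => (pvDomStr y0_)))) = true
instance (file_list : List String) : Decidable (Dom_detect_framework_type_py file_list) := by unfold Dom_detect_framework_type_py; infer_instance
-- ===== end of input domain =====

-- B replaces A's five prioritized any(...) scans by a keyword table that ranks each filename once; the answer is the framework name at the minimum rank.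


-- ===== PORT A =====
-- substring tests on lowercased filenames, exactly A's conditions
def pvHasFlutter (f : String) : Bool := PySem.Str.isIn "flutter" (PySem.Str.lower f)
def pvHasHybrid (f : String) : Bool :=
  PySem.Str.isIn "react" (PySem.Str.lower f) || PySem.Str.isIn "ionic" (PySem.Str.lower f)
def pvHasWeb (f : String) : Bool :=
  PySem.Str.isIn "cordova" (PySem.Str.lower f) || PySem.Str.isIn "phonegap" (PySem.Str.lower f)
def pvHasGame (f : String) : Bool :=
  PySem.Str.isIn "unity" (PySem.Str.lower f) || PySem.Str.isIn "unreal" (PySem.Str.lower f)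
def pvHasEnterprise (f : String) : Bool :=
  PySem.Str.isIn "enterprise" (PySem.Str.lower f) || PySem.Str.isIn "corp" (PySem.Str.lower f)

-- A: five separate any(...) scans, in priority order
def detect_framework_type_py (file_list : List String) : String :=
  if file_list.any pvHasFlutter then "flutter"
  else if file_list.any pvHasHybrid then "hybrid"
  else if file_list.any pvHasWeb then "web"
  else if file_list.any pvHasGame then "game"
  else if file_list.any pvHasEnterprise then "enterprise"
  else "native"

-- ===== PORT B =====
def pvFrameworks : List String := ["flutter", "hybrid", "web", "game", "enterprise", "native"]
def pvKeywords : List (List String) :=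
  [["flutter"], ["react", "ionic"], ["cordova", "phonegap"], ["unity", "unreal"], ["enterprise", "corp"]]

-- _rank's loop over the keyword table, returning the index of the first matching group
def pvRankGo (g : String) : List (List String) → Nat → Nat
  | [], i => i
  | kws :: rest, i => if kws.any (fun k => PySem.Str.isIn k g) then i else pvRankGo g rest (i + 1)

def pvRank (f : String) : Nat := pvRankGo (PySem.Str.lower f) pvKeywords 0

-- min(map(_rank, file_list), default=len(_KEYWORDS)); folding min with seed 5 is exact
-- since every rank is ≤ 5.  Indexing _FRAMEWORKS[m] is in range (m ≤ 5 < 6): getD is exact.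
def detect_framework_type_py_alt (file_list : List String) : String :=
  pvFrameworks.getD ((file_list.map pvRank).foldl min pvKeywords.length) "native"

-- ===== PRECONDITION & SPEC =====
def Spec_detect_framework_type_py (file_list : List String) (out : String) : Prop := out = detect_framework_type_py_alt file_list
instance (file_list : List String) (out : String) : Decidable (Spec_detect_framework_type_py file_list out) := by unfold Spec_detect_framework_type_py; infer_instance

-- ===== CLAIM (what is proved, stated in full; the proofs are below) =====
def Claim_equal_detect_framework_type_py : Prop := ∀ (file_list : List String), Dom_detect_framework_type_py file_list → Spec_detect_framework_type_py file_list (detect_framework_type_py file_list)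

-- ===== LEMMAS AND PROOFS =====
-- closed form of one file's rank
theorem pvRank_eq (f : String) :
    pvRank f =
      if pvHasFlutter f then 0
      else if pvHasHybrid f then 1
      else if pvHasWeb f then 2
      else if pvHasGame f then 3
      else if pvHasEnterprise f then 4
      else 5 := by
  simp [pvRank, pvKeywords, pvRankGo, pvHasFlutter, pvHasHybrid, pvHasWeb, pvHasGame,
    pvHasEnterprise, List.any]

theorem pvRank_le (f : String) : pvRank f ≤ 5 := by
  rw [pvRank_eq]; split_ifs <;> omega

-- chain value of the minimum rank over a list
def pvChain (l : List String) : Nat :=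
  if l.any pvHasFlutter then 0
  else if l.any pvHasHybrid then 1
  else if l.any pvHasWeb then 2
  else if l.any pvHasGame then 3
  else if l.any pvHasEnterprise then 4
  else 5

-- the min of two priority-chain values, on plain booleans (checked by decide)
theorem pvMin_chain (b1 b2 b3 b4 b5 c1 c2 c3 c4 c5 : Bool) :
    (if b1 || c1 then 0 else if b2 || c2 then 1 else if b3 || c3 then 2
     else if b4 || c4 then 3 else if b5 || c5 then 4 else 5)
      = min (if b1 then 0 else if b2 then 1 else if b3 then 2 else if b4 then 3
             else if b5 then 4 else 5)
            (if c1 then 0 else if c2 then 1 else if c3 then 2 else if c4 then 3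
             else if c5 then 4 else (5 : Nat)) := by
  cases b1 <;> cases b2 <;> cases b3 <;> cases b4 <;> cases b5 <;>
    cases c1 <;> cases c2 <;> cases c3 <;> cases c4 <;> cases c5 <;> rfl

theorem pvChain_cons (x : String) (xs : List String) :
    pvChain (x :: xs) = min (pvRank x) (pvChain xs) := by
  rw [pvRank_eq]
  simp only [pvChain, List.any_cons]
  exact pvMin_chain _ _ _ _ _ _ _ _ _ _

theorem pvFoldl_min (l : List String) (a : Nat) (ha : a ≤ 5) :
    (l.map pvRank).foldl min a = min a (pvChain l) := by
  induction l generalizing a with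
  | nil => simp [pvChain]; omega
  | cons x xs ih =>
      have hx := pvRank_le x
      simp only [List.map_cons, List.foldl_cons]
      rw [ih (min a (pvRank x)) (by omega), pvChain_cons, Nat.min_assoc]

-- ===== VERDICT (by name: the statement is the Claim_ definition above) =====
theorem detect_framework_type_py_spec : Claim_equal_detect_framework_type_py := by
  intro file_list _
  show detect_framework_type_py file_list = detect_framework_type_py_alt file_list
  rw [detect_framework_type_py_alt, show pvKeywords.length = 5 from rfl,
    pvFoldl_min file_list 5 (by omega)]
  simp only [detect_framework_type_py, pvChain]
  split_ifs <;> rfl
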